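-- pv_equiv track=rewrite | github.com/dongyun3586/2024_99_Coding_Club | Level 2 미들러/ex27_할인 행사.py | solution
-- ===== SOURCE A (Python) =====
-- def solution(want, number, discount):
--     want_dict = dict(zip(want, number))     # 원하는 제품과 그 수량을 매핑한 딕셔너리 생성
--     check_days = 10     # 체크할 기간
--     count = 0   # 가능한 날짜 수 카운트
--
--     # 현재 윈도우 내에서 원하는 각 제품의 수량을 추적할 딕셔너리: 초기값은 모두 0으로 설정
--     current_window = {product: 0 for product in want}
--
--     # 체크할 기간 크기의 첫 윈도우에 대해 제품 수량을 계산
--     for i in range(check_days):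
--         if discount[i] in current_window:   # 원하는 제품인 경우만 개수 추가
--             current_window[discount[i]] += 1
--
--     # 첫 윈도우가 조건을 만족하는지 확인
--     if all(current_window[product] >= want_dict[product] for product in want_dict):
--         count += 1
--
--     # 슬라이딩 윈도우를 이동시키면서 나머지 부분 확인: (가장 왼쪽 요소 제거), (가장 오른쪽 요소 추가)
--     for i in range(len(discount) - check_days):
--         # 윈도우에서 빠지는 아이템
--         if discount[i] in current_window:
--             current_window[discount[i]] -= 1
--
--         # 윈도우에 새로 들어오는 아이템
--         if discount[i + check_days] in current_window:
--             current_window[discount[i + check_days]] += 1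
--
--         # 현재 윈도우가 조건을 만족하는지 확인
--         if all(current_window[product] >= want_dict[product] for product in want_dict):
--             count += 1
--
--     return count
-- ===== SOURCE B (Python) =====
-- def solution(want, number, discount):
--     want_dict = dict(zip(want, number))
--     count = 0
--     i = 0
--     while True:
--         window = [discount[i + j] for j in range(10)]
--         if all(window.count(p) >= q for p, q in want_dict.items()):
--             count += 1
--         i += 1
--         if i + 9 >= len(discount):
--             return count
-- ===== Notes on version B (the rewrite author's own statement) =====
-- stated objective: alternative
-- what changed: Replaced A's incremental sliding-window add/remove bookkeeping over a mutable counts dict with a do-while loop that rebuilds each 10-day window fresh by indexing and tests it with per-product count.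
import Mathlib
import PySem

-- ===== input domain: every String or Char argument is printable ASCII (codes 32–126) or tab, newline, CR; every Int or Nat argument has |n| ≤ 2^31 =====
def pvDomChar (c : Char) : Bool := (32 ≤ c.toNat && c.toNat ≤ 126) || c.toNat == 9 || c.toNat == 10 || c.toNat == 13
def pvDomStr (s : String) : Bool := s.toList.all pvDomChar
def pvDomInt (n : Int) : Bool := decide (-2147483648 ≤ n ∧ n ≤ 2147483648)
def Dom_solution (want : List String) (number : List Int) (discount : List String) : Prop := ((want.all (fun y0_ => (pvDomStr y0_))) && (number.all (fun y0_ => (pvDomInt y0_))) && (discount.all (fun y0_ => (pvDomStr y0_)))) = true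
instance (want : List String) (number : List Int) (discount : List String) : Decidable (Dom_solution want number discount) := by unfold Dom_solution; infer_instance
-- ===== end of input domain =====

-- B replaces A's incremental sliding-window counter bookkeeping by a fresh rescan of each 10-day window; A = B on every input with len(discount) ≥ 10 (Pre_; below 10 A raises IndexError).


-- ===== PORT A =====
-- want_dict = dict(zip(want, number))
def wantDictOf (want : List String) (number : List Int) : PySem.Dict String Int :=
  (want.zip number).foldl (fun d p => d.insert p.1 p.2) PySem.Dict.empty

-- all(current_window[product] >= want_dict[product] for product in want_dict)
def checkA (wd cw : PySem.Dict String Int) : Bool :=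
  wd.keys.all (fun p => decide (wd.getD p 0 ≤ cw.getD p 0))

def solution (want : List String) (number : List Int) (discount : List String) : Int :=
  let wd := wantDictOf want number
  -- current_window = {product: 0 for product in want}
  let cw0 : PySem.Dict String Int := want.foldl (fun d p => d.insert p 0) PySem.Dict.empty
  -- for i in range(check_days): if discount[i] in current_window: current_window[discount[i]] += 1
  let cw1 := (PySem.List.pyRange 0 10 1).foldl
    (fun cw i =>
      let x := PySem.List.pyGetD discount i ""
      if cw.contains x then cw.modify x 0 (· + 1) else cw) cw0
  let c0 : Int := if checkA wd cw1 then 1 else 0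
  -- for i in range(len(discount) - check_days): …
  ((PySem.List.pyRange 0 ((discount.length : Int) - 10) 1).foldl
    (fun st i =>
      let x := PySem.List.pyGetD discount i ""
      let cwa := if st.1.contains x then st.1.modify x 0 (· - 1) else st.1
      let y := PySem.List.pyGetD discount (i + 10) ""
      let cwb := if cwa.contains y then cwa.modify y 0 (· + 1) else cwa
      (cwb, if checkA wd cwb then st.2 + 1 else st.2))
    (cw1, c0)).2

-- ===== PORT B =====
-- all(window.count(p) >= q for p, q in want_dict.items())
def checkB (wd : PySem.Dict String Int) (window : List String) : Bool :=
  wd.items.all (fun p => decide (p.2 ≤ (window.count p.1 : Int)))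

-- the do-while loop: build the window at start i by indexing, test it, stop when no full
-- window remains (pyGetD's default is never read on inputs where the Python loop returns:
-- there every access discount[i+j] is in range)
def loopB (want : List String) (number : List Int) (discount : List String)
    (i : Nat) (count : Int) : Int :=
  let window := (List.range 10).map (fun j => PySem.List.pyGetD discount ((i + j : Nat) : Int) "")
  let count' := if checkB (wantDictOf want number) window then count + 1 else count
  if _h : i + 1 + 9 ≥ discount.length then count'
  else loopB want number discount (i + 1) count'
termination_by discount.length - i
decreasing_by omega

def solution_alt (want : List String) (number : List Int) (discount : List String) : Int :=
  loopB want number discount 0 0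

-- ===== PRECONDITION & SPEC =====
-- Pre_ excludes exactly the inputs where A raises IndexError: fewer than 10 discount days.
def Pre_solution (want : List String) (number : List Int) (discount : List String) : Prop :=
  10 ≤ discount.length
instance (want : List String) (number : List Int) (discount : List String) : Decidable (Pre_solution want number discount) := by unfold Pre_solution; infer_instance

def pvWitness_solution : List String × List Int × List String :=
  (["a", "b"], [2, 1], ["a", "a", "b", "c", "c", "c", "a", "b", "a", "b", "a"])

def Spec_solution (want : List String) (number : List Int) (discount : List String) (out : Int) : Prop := out = solution_alt want number discount
instance (want : List String) (number : List Int) (discount : List String) (out : Int) : Decidable (Spec_solution want number discount out) := by unfold Spec_solution; infer_instance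

-- ===== CLAIM (what is proved, stated in full; the proofs are below) =====
def Claim_equal_solution : Prop := ∀ (want : List String) (number : List Int) (discount : List String), Dom_solution want number discount → Pre_solution want number discount → Spec_solution want number discount (solution want number discount)

-- ===== LEMMAS AND PROOFS =====

-- the 10-day window starting at day a
def winAt (discount : List String) (a : Nat) : List String := (discount.drop a).take 10

-- "window a satisfies the demand", B's test on that window
def okW (want : List String) (number : List Int) (discount : List String) (a : Nat) : Bool :=
  checkB (wantDictOf want number) (winAt discount a)

-- A's second loop body, over Nat indices: remove the leaving item, add the entering one, test
def minusA (discount : List String) (cw : PySem.Dict String Int) (k : Nat) :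
    PySem.Dict String Int :=
  if cw.contains (discount.getD k "") then cw.modify (discount.getD k "") 0 (· - 1) else cw

def slideA (discount : List String) (cw : PySem.Dict String Int) (k : Nat) :
    PySem.Dict String Int :=
  if (minusA discount cw k).contains (discount.getD (k + 10) "") then
    (minusA discount cw k).modify (discount.getD (k + 10) "") 0 (· + 1)
  else minusA discount cw k

def stepA (want : List String) (number : List Int) (discount : List String)
    (st : PySem.Dict String Int × Int) (k : Nat) : PySem.Dict String Int × Int :=
  (slideA discount st.1 k,
   if checkA (wantDictOf want number) (slideA discount st.1 k) then st.2 + 1 else st.2)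

lemma all_congr_mem {A : Type} (l : List A) (f g : A → Bool) (h : ∀ x ∈ l, f x = g x) :
    l.all f = l.all g := by
  induction l with
  | nil => rfl
  | cons x l ih =>
    simp only [List.all_cons, h x (List.mem_cons_self ..),
      ih (fun y hy => h y (List.mem_cons_of_mem _ hy))]

lemma contains_guard (cw : PySem.Dict String Int) (x q : String) (f : Int → Int) :
    ((if cw.contains x then cw.modify x 0 f else cw).contains q) = cw.contains q := by
  by_cases hx : cw.contains x
  · rw [if_pos hx, PySem.Dict.contains_modify]
    by_cases hq : q = x
    · subst hq; simp [hx]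
    · simp [hq]
  · rw [if_neg hx]

lemma getD_guard (cw : PySem.Dict String Int) (x p : String) (f : Int → Int)
    (hp : cw.contains p = true) :
    ((if cw.contains x then cw.modify x 0 f else cw).getD p 0)
      = if p = x then f (cw.getD x 0) else cw.getD p 0 := by
  by_cases hx : cw.contains x
  · rw [if_pos hx, PySem.Dict.getD_modify]
  · have hpx : p ≠ x := fun h => hx (h ▸ hp)
    rw [if_neg hx, if_neg hpx]

lemma foldl_bump_contains (l : List String) (cw : PySem.Dict String Int) (q : String) :
    ((l.foldl (fun cw x => if cw.contains x then cw.modify x 0 (· + 1) else cw) cw).contains q)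
      = cw.contains q := by
  induction l generalizing cw with
  | nil => rfl
  | cons x l ih => rw [List.foldl_cons, ih, contains_guard]

lemma foldl_bump_getD (l : List String) (cw : PySem.Dict String Int) (p : String)
    (hp : cw.contains p = true) :
    ((l.foldl (fun cw x => if cw.contains x then cw.modify x 0 (· + 1) else cw) cw).getD p 0)
      = cw.getD p 0 + l.count p := by
  induction l generalizing cw with
  | nil => simp
  | cons x l ih =>
    rw [List.foldl_cons, ih _ (by rw [contains_guard]; exact hp), getD_guard cw x p _ hp,
      List.count_cons]
    by_cases h : p = x
    · subst h; simp; ring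
    · simp [h, Ne.symm h]

lemma cw0_contains_aux (l : List String) (d : PySem.Dict String Int) (q : String) :
    ((l.foldl (fun d p => d.insert p 0) d).contains q) = (d.contains q || decide (q ∈ l)) := by
  induction l generalizing d with
  | nil => simp
  | cons x l ih =>
    rw [List.foldl_cons, ih, PySem.Dict.contains_insert]
    by_cases hq : q = x
    · subst hq; simp
    · rw [beq_eq_false_iff_ne.mpr hq]; simp [hq]

lemma cw0_getD_aux (l : List String) (d : PySem.Dict String Int) (q : String)
    (h : d.getD q 0 = 0) :
    (l.foldl (fun d p => d.insert p 0) d).getD q 0 = 0 := by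
  induction l generalizing d with
  | nil => exact h
  | cons x l ih =>
    rw [List.foldl_cons]
    refine ih _ ?_
    rw [PySem.Dict.getD_insert]
    split <;> simp [h]

lemma foldl_range_getD_take {B : Type} (g : B → String → B) (xs : List String) (init : B) :
    ∀ (n : Nat), n ≤ xs.length →
      (List.range n).foldl (fun acc k => g acc (xs.getD k "")) init
        = (xs.take n).foldl g init := by
  intro n
  induction n with
  | zero => intro _; simp
  | succ n ih =>
    intro h
    have h' : n ≤ xs.length := Nat.le_of_succ_le h
    have hn : n < xs.length := h
    rw [List.range_succ, List.foldl_append, ih h', List.take_add_one,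
      List.getElem?_eq_getElem hn, List.foldl_append]
    simp [List.getD, List.getElem?_eq_getElem hn]

lemma first_loop_eq (discount : List String) (d0 : PySem.Dict String Int) (n : Nat)
    (h : n ≤ discount.length) :
    (List.range n).foldl
        (fun x y => if x.contains (discount.getD y "") then
          x.modify (discount.getD y "") 0 (· + 1) else x) d0
      = (discount.take n).foldl
          (fun cw x => if cw.contains x then cw.modify x 0 (· + 1) else cw) d0 :=
  foldl_range_getD_take (fun cw x => if cw.contains x then cw.modify x 0 (· + 1) else cw)
    discount d0 n h

lemma wantDict_keys_nodup (want : List String) (number : List Int) :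
    (wantDictOf want number).keys.Nodup := by
  unfold wantDictOf
  exact PySem.Dict.nodup_keys_foldl_insert_key _ Prod.fst (fun d x => x.2) _
    (by rw [PySem.Dict.keys_empty]; exact List.nodup_nil)

lemma wantDict_keys_mem (want : List String) (number : List Int) (k : String)
    (hk : k ∈ (wantDictOf want number).keys) : k ∈ want := by
  unfold wantDictOf at hk
  rw [PySem.Dict.keys_foldl_insert_key, PySem.Dict.keys_empty] at hk
  rw [show PySem.Set.update ([] : List String) ((want.zip number).map Prod.fst)
        = PySem.Set.ofList ((want.zip number).map Prod.fst) from rfl,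
    PySem.Set.mem_ofList] at hk
  obtain ⟨⟨a, b⟩, hab, rfl⟩ := List.mem_map.mp hk
  exact (List.of_mem_zip hab).1

lemma check_eq (want : List String) (number : List Int) (discount : List String) (a : Nat)
    (cw : PySem.Dict String Int)
    (hk : ∀ q, cw.contains q = decide (q ∈ want))
    (hv : ∀ p ∈ want, cw.getD p 0 = ((winAt discount a).count p : Int)) :
    checkA (wantDictOf want number) cw = checkB (wantDictOf want number) (winAt discount a) := by
  unfold checkA checkB
  rw [PySem.Dict.items_eq_map_keys _ (wantDict_keys_nodup want number) 0, List.all_map]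
  refine all_congr_mem _ _ _ (fun k hkm => ?_)
  simp only [Function.comp]
  rw [hv k (wantDict_keys_mem want number k hkm)]

lemma window_eq (xs : List String) (i : Nat) (h : i + 10 ≤ xs.length) :
    (List.range 10).map (fun j => PySem.List.pyGetD xs ((i + j : Nat) : Int) "")
      = winAt xs i := by
  unfold winAt
  apply List.ext_getElem
  · simp [List.length_take, List.length_drop]; omega
  · intro k h1 h2
    simp only [List.getElem_map, List.getElem_range, PySem.List.pyGetD_natCast,
      List.getElem_take, List.getElem_drop]
    rw [List.getD_eq_getElem _ _ (by simp at h1; omega)]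

lemma loopB_spec (want : List String) (number : List Int) (discount : List String) :
    ∀ (m i : Nat) (c : Int),
      i + m + 10 = discount.length →
      loopB want number discount i c
        = c + (((List.range' i (m + 1)).countP (fun j => okW want number discount j)) : Int) := by
  intro m
  induction m with
  | zero =>
    intro i c h
    rw [loopB, window_eq _ _ (by omega), dif_pos (by omega)]
    by_cases hok : checkB (wantDictOf want number) (winAt discount i) <;>
      simp [List.range'_one, okW, hok]
  | succ m ih =>
    intro i c h
    rw [loopB, window_eq _ _ (by omega), dif_neg (by omega)]
    conv_rhs => rw [List.range'_succ, List.countP_cons]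
    rw [ih (i + 1) _ (by omega)]
    have hoki : okW want number discount i
        = checkB (wantDictOf want number) (winAt discount i) := rfl
    rw [hoki]
    split_ifs <;> push_cast <;> omega

lemma count_win_succ (discount : List String) (p : String) (a : Nat)
    (h : a + 11 ≤ discount.length) :
    ((winAt discount (a + 1)).count p : Int)
      = ((winAt discount a).count p : Int)
        - (if p = discount.getD a "" then 1 else 0)
        + (if p = discount.getD (a + 10) "" then 1 else 0) := by
  have ha : a < discount.length := by omega
  have ha10 : a + 10 < discount.length := by omega
  have h9 : 9 < (discount.drop (a + 1)).length := by
    rw [List.length_drop]; omega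
  have e1 : winAt discount a = discount[a] :: (discount.drop (a + 1)).take 9 := by
    unfold winAt
    rw [List.drop_eq_getElem_cons ha, List.take_succ_cons]
  have e2 : winAt discount (a + 1) = (discount.drop (a + 1)).take 9 ++ [discount[a + 10]] := by
    unfold winAt
    rw [show (discount.drop (a + 1)).take 10 = (discount.drop (a + 1)).take (9 + 1) from rfl,
      List.take_add_one, List.getElem?_eq_getElem h9, List.getElem_drop]
    simp only [show a + 1 + 9 = a + 10 from by omega]
    rfl
  rw [e1, e2, List.count_append, List.count_cons,
    List.getD_eq_getElem discount "" ha, List.getD_eq_getElem discount "" ha10]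
  simp only [List.count_cons, List.count_nil, beq_iff_eq, Nat.zero_add]
  simp only [eq_comm]
  split_ifs <;> push_cast <;> omega

lemma loopA (want : List String) (number : List Int) (discount : List String) :
    ∀ (m a : Nat) (cw : PySem.Dict String Int) (c : Int),
      a + m + 10 = discount.length →
      (∀ q, cw.contains q = decide (q ∈ want)) →
      (∀ p ∈ want, cw.getD p 0 = ((winAt discount a).count p : Int)) →
      ((List.range' a m).foldl (stepA want number discount) (cw, c)).2
        = c + (((List.range' (a + 1) m).countP (fun j => okW want number discount j)) : Int) := by
  intro m
  induction m with
  | zero => intro a cw c _ _ _; simp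
  | succ m ih =>
    intro a cw c hlen hk hv
    rw [List.range'_succ, List.foldl_cons]
    have hxp : ∀ p, p ∈ want → cw.contains p = true := fun p hp => by
      rw [hk]; simp [hp]
    have hka : ∀ q, (minusA discount cw a).contains q = decide (q ∈ want) := fun q => by
      unfold minusA; rw [contains_guard, hk]
    have hkb : ∀ q, (slideA discount cw a).contains q = decide (q ∈ want) := fun q => by
      unfold slideA; rw [contains_guard, hka]
    have hvb : ∀ p ∈ want,
        (slideA discount cw a).getD p 0 = ((winAt discount (a + 1)).count p : Int) := by
      intro p hp
      unfold slideA
      rw [getD_guard (minusA discount cw a) (discount.getD (a + 10) "") p _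
        (by rw [hka]; simp [hp])]
      rw [count_win_succ discount p a (by omega)]
      by_cases h1 : p = discount.getD (a + 10) ""
      · rw [if_pos h1, if_pos h1, ← h1]
        unfold minusA
        rw [getD_guard cw (discount.getD a "") p _ (hxp p hp)]
        by_cases h2 : p = discount.getD a ""
        · rw [if_pos h2, if_pos h2, ← h2, hv p hp]; try ring
        · rw [if_neg h2, if_neg h2, hv p hp]; try ring
      · rw [if_neg h1, if_neg h1]
        unfold minusA
        rw [getD_guard cw (discount.getD a "") p _ (hxp p hp)]
        by_cases h2 : p = discount.getD a ""
        · rw [if_pos h2, if_pos h2, ← h2, hv p hp]; try ring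
        · rw [if_neg h2, if_neg h2, hv p hp]; try ring
    have hstep : stepA want number discount (cw, c) a
        = (slideA discount cw a, if okW want number discount (a + 1) then c + 1 else c) := by
      unfold stepA okW
      rw [check_eq want number discount (a + 1) _ hkb hvb]
    rw [hstep, ih (a + 1) _ _ (by omega) hkb hvb, List.range'_succ, List.countP_cons]
    by_cases hok : okW want number discount (a + 1) <;> simp [hok] <;> ring

-- ===== VERDICT (by name: the statement is the Claim_ definition above) =====
theorem solution_spec : Claim_equal_solution := by
  intro want number discount _ hpre
  unfold Pre_solution at hpre
  unfold Spec_solution solution solution_alt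
  simp only []
  rw [show ((discount.length : Int) - 10) = (((discount.length - 10 : Nat)) : Int) from by omega,
    show (10 : Int) = ((10 : Nat) : Int) from by norm_num,
    PySem.List.pyRange_one, PySem.List.pyRange_one]
  simp only [sub_zero, Int.toNat_natCast, List.foldl_map, zero_add]
  have hg2 : ∀ k : Nat, PySem.List.pyGetD discount ((k : Int) + ((10 : Nat) : Int)) ""
      = discount.getD (k + 10) "" := fun k => by
    rw [show ((k : Int) + ((10 : Nat) : Int)) = (((k + 10 : Nat)) : Int) from by push_cast; ring,
      PySem.List.pyGetD_natCast]
  simp only [hg2, PySem.List.pyGetD_natCast]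
  -- both sides are now folds over Nat ranges; rename A's loop body to stepA (definitional)
  show (List.foldl (stepA want number discount)
      ((List.range 10).foldl
        (fun x y => if x.contains (discount.getD y "") then
          x.modify (discount.getD y "") 0 (· + 1) else x)
        (want.foldl (fun d p => d.insert p 0) PySem.Dict.empty),
       if checkA (wantDictOf want number)
          ((List.range 10).foldl
            (fun x y => if x.contains (discount.getD y "") then
              x.modify (discount.getD y "") 0 (· + 1) else x)
            (want.foldl (fun d p => d.insert p 0) PySem.Dict.empty)) then (1 : Int) else 0)
      (List.range (discount.length - 10))).2
    = loopB want number discount 0 0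
  rw [first_loop_eq discount _ 10 hpre]
  have hk1 : ∀ q, ((discount.take 10).foldl
      (fun cw x => if cw.contains x then cw.modify x 0 (· + 1) else cw)
      (want.foldl (fun d p => d.insert p 0) PySem.Dict.empty
        : PySem.Dict String Int)).contains q
        = decide (q ∈ want) := fun q => by
    rw [foldl_bump_contains, cw0_contains_aux]; simp
  have hv1 : ∀ p ∈ want, ((discount.take 10).foldl
      (fun cw x => if cw.contains x then cw.modify x 0 (· + 1) else cw)
      (want.foldl (fun d p => d.insert p 0) PySem.Dict.empty
        : PySem.Dict String Int)).getD p 0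
        = ((winAt discount 0).count p : Int) := fun p hp => by
    rw [foldl_bump_getD _ _ _ (by rw [cw0_contains_aux]; simp [hp]),
      cw0_getD_aux _ _ _ (by simp)]
    unfold winAt; rw [List.drop_zero]; simp
  simp only [List.range_eq_range']
  rw [loopA want number discount (discount.length - 10) 0 _ _ (by omega) hk1 hv1]
  rw [loopB_spec want number discount (discount.length - 10) 0 0 (by omega),
    List.range'_succ, List.countP_cons,
    check_eq want number discount 0 _ hk1 hv1]
  have hok0 : checkB (wantDictOf want number) (winAt discount 0)
      = okW want number discount 0 := rfl
  rw [hok0]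
  by_cases hok : okW want number discount 0 <;> simp [hok] <;> omega
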